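-- pv_equiv track=rewrite | github.com/rencap12/interview_practice | tip_w1.py | tiggerfy
-- ===== SOURCE A (Python) =====
-- def tiggerfy(word):
--     new_str = []
--
--     for i in range(0, len(word)):
--         curr_char = word[i].lower() # ??
--         if (curr_char == 't'):
--             continue
--         elif (curr_char == 'i'):
--             continue
--
--         # Check er
--         elif (curr_char == 'r'):
--             if (len(new_str) == 0):
--                 new_str.append(curr_char)
--             else:
--                 if (new_str[len(new_str) - 1] == 'e'):
--                     new_str.pop()
--                 else:
--                     new_str.append(curr_char)
--         # Check gg
--         elif (curr_char == 'g'):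
--             if (len(new_str) == 0):
--                 new_str.append(curr_char)
--             else:
--                 if (new_str[len(new_str) - 1] == 'g'):
--                     new_str.pop()
--                 else:
--                     new_str.append(curr_char)
--         else:
--             new_str.append(curr_char)
--
--     return "".join(new_str)
-- ===== SOURCE B (Python) =====
-- def tiggerfy(word):
--     # lowercase and drop 't'/'i', then cancel "er"/"gg" pairs by rewriting to a fixpoint
--     s = ''.join(c for c in word.lower() if c != 't' and c != 'i')
--     while True:
--         nxt = s.replace('er', '').replace('gg', '')
--         if nxt == s:
--             return s
--         s = nxt
-- ===== Notes on version B (the rewrite author's own statement) =====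
-- stated objective: alternative
-- what changed: Replaces the single-pass explicit stack with: lowercase, strip 't'/'i', then repeatedly apply s.replace('er','').replace('gg','') until the string stops changing; the rewrite system {er->eps, gg->eps} is confluent and terminating, so the fixpoint equals the stack's normal form.
import Mathlib
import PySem

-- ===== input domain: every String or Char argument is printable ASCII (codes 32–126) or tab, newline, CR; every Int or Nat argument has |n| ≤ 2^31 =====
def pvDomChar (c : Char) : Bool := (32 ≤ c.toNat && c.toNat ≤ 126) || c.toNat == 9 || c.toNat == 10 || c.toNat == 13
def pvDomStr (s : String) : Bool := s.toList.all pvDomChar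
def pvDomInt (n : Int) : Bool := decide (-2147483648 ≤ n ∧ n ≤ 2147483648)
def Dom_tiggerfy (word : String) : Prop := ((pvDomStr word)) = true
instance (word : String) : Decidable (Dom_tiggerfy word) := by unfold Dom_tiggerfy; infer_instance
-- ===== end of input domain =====

-- B replaces A's one-pass explicit stack by lowercase + strip 't'/'i' followed by repeated
-- full-string replace("er","")/replace("gg","") to a fixpoint (same return value, different algorithm).


-- ===== PORT A =====
-- for i in range(0, len(word)): stack push/pop on new_str; return "".join(new_str)
def tiggerfy (word : String) : String :=
  let new_str : List Char :=
    (PySem.List.pyRange 0 (PySem.Chars.len word.toList) 1).foldl (fun new_str i =>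
      let curr_char := PySem.Chars.lowerChar (PySem.List.pyGetD word.toList i ' ')
      if curr_char = 't' then new_str
      else if curr_char = 'i' then new_str
      else if curr_char = 'r' then
        if new_str.length = 0 then new_str ++ [curr_char]
        else if new_str.getLastD ' ' = 'e' then new_str.dropLast
        else new_str ++ [curr_char]
      else if curr_char = 'g' then
        if new_str.length = 0 then new_str ++ [curr_char]
        else if new_str.getLastD ' ' = 'g' then new_str.dropLast
        else new_str ++ [curr_char]
      else new_str ++ [curr_char]) []
  String.mk (PySem.Chars.join [] (new_str.map (fun c => [c])))

-- ===== PORT B =====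
-- Helper facts cited by tigFix's decreasing_by (the port needs them for termination; nothing else above the claim).
-- rem2 a b l = l with every (non-overlapping, left-to-right) occurrence of the two-char pattern [a,b] removed;
-- proved below (replace_eq_rem2) to be exactly PySem.Chars.replace l [a,b] [].
def rem2 (a b : Char) : List Char → List Char
  | [] => []
  | [c] => [c]
  | c :: d :: t => if c = a ∧ d = b then rem2 a b t else c :: rem2 a b (d :: t)

theorem rem2_length_le (a b : Char) : ∀ l : List Char, (rem2 a b l).length ≤ l.length := by
  intro l
  fun_induction rem2 <;> simp_all <;> omega

theorem rem2_eq_of_length_eq (a b : Char) :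
    ∀ l : List Char, (rem2 a b l).length = l.length → rem2 a b l = l := by
  intro l
  fun_induction rem2 with
  | case1 => simp
  | case2 => simp
  | case3 c d t h ih =>
      intro hlen
      have hle := rem2_length_le a b t
      exfalso
      simp at hlen
      omega
  | case4 c d t h ih =>
      intro hlen
      simp only [List.length_cons] at hlen
      rw [ih (by simp only [List.length_cons]; omega)]

theorem go_eq_rem2 (a b : Char) :
    ∀ (fuel : Nat) (l acc : List Char), l.length ≤ fuel →
      PySem.Chars.replace.go [a, b] [] fuel l acc = acc.reverse ++ rem2 a b l := by
  intro fuel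
  induction fuel with
  | zero =>
      intro l acc hl
      have : l = [] := by cases l <;> simp_all
      subst this
      simp [PySem.Chars.replace.go, rem2]
  | succ f ih =>
      intro l acc hl
      match l with
      | [] => simp [PySem.Chars.replace.go, rem2]
      | [c] =>
          have hpre : List.isPrefixOf [a, b] [c] = false := by
            simp [List.isPrefixOf]
          have htail : PySem.Chars.replace.go [a, b] [] f [] (c :: acc) = (c :: acc).reverse := by
            cases f <;> simp [PySem.Chars.replace.go]
          rw [PySem.Chars.replace.go]
          simp [hpre, htail, rem2]
      | c :: d :: t =>
          by_cases hp : c = a ∧ d = b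
          · obtain ⟨hc, hd⟩ := hp
            subst hc; subst hd
            simp at hl
            rw [PySem.Chars.replace.go]
            simp [List.isPrefixOf, rem2]
            rw [ih t acc (by omega)]
          · rw [PySem.Chars.replace.go]
            have hpre : [a, b].isPrefixOf (c :: d :: t) = false := by
              simp [List.isPrefixOf]
              intro hc hd
              exact hp ⟨hc.symm, hd.symm⟩
            simp [hpre, rem2, hp]
            rw [ih (d :: t) (c :: acc) (by simp at hl ⊢; omega)]
            simp

theorem replace_eq_rem2 (a b : Char) (l : List Char) :
    PySem.Chars.replace l [a, b] [] = rem2 a b l := by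
  rw [PySem.Chars.replace]
  simp
  exact go_eq_rem2 a b l.length l [] le_rfl

-- while True: nxt = s.replace('er','').replace('gg',''); if nxt == s: return s; s = nxt
def tigFix (s : List Char) : List Char :=
  let nxt := PySem.Chars.replace (PySem.Chars.replace s ['e', 'r'] []) ['g', 'g'] []
  if nxt = s then s else tigFix nxt
termination_by s.length
decreasing_by
  rename_i h
  have hnxt : nxt = rem2 'g' 'g' (rem2 'e' 'r' s) := by
    simp only [nxt, replace_eq_rem2]
  rw [hnxt] at h
  simp only [replace_eq_rem2]
  have h1 : (rem2 'e' 'r' s).length ≤ s.length := rem2_length_le _ _ s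
  have h2 : (rem2 'g' 'g' (rem2 'e' 'r' s)).length ≤ (rem2 'e' 'r' s).length := rem2_length_le _ _ _
  by_contra hge
  have hlen : (rem2 'g' 'g' (rem2 'e' 'r' s)).length = s.length := by omega
  have he : rem2 'e' 'r' s = s := rem2_eq_of_length_eq _ _ s (by omega)
  rw [he] at hlen h
  exact h (rem2_eq_of_length_eq _ _ s hlen)

def tiggerfy_alt (word : String) : String :=
  String.mk (tigFix ((PySem.Chars.lower word.toList).filter (fun c => !(c == 't') && !(c == 'i'))))

-- ===== PRECONDITION & SPEC =====
def Spec_tiggerfy (word : String) (out : String) : Prop := out = tiggerfy_alt word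
instance (word : String) (out : String) : Decidable (Spec_tiggerfy word out) := by unfold Spec_tiggerfy; infer_instance

-- ===== CLAIM (what is proved, stated in full; the proofs are below) =====
def Claim_equal_tiggerfy : Prop := ∀ (word : String), Dom_tiggerfy word → Spec_tiggerfy word (tiggerfy word)

-- ===== LEMMAS AND PROOFS =====

-- the pair relation forbidden on adjacent stack entries / in an irreducible string
def okR (x y : Char) : Prop := ¬(x = 'e' ∧ y = 'r') ∧ ¬(x = 'g' ∧ y = 'g')

def Ok (l : List Char) : Prop := l.IsChain okR

-- A's loop body, named (definitionally the lambda inside tiggerfy)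
def stepA (new_str : List Char) (c0 : Char) : List Char :=
  let curr_char := PySem.Chars.lowerChar c0
  if curr_char = 't' then new_str
  else if curr_char = 'i' then new_str
  else if curr_char = 'r' then
    if new_str.length = 0 then new_str ++ [curr_char]
    else if new_str.getLastD ' ' = 'e' then new_str.dropLast
    else new_str ++ [curr_char]
  else if curr_char = 'g' then
    if new_str.length = 0 then new_str ++ [curr_char]
    else if new_str.getLastD ' ' = 'g' then new_str.dropLast
    else new_str ++ [curr_char]
  else new_str ++ [curr_char]

-- A's stack step on an already-lowercased char c ∉ {'t','i'}
def coreStep (acc : List Char) (c : Char) : List Char :=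
  if c = 'r' then
    if acc.length = 0 then acc ++ [c]
    else if acc.getLastD ' ' = 'e' then acc.dropLast
    else acc ++ [c]
  else if c = 'g' then
    if acc.length = 0 then acc ++ [c]
    else if acc.getLastD ' ' = 'g' then acc.dropLast
    else acc ++ [c]
  else acc ++ [c]

theorem tiggerfy_eq (word : String) :
    tiggerfy word = String.mk (PySem.Chars.join [] ((word.toList.foldl stepA []).map (fun c => [c]))) := by
  show String.mk (PySem.Chars.join []
    ((List.foldl (fun acc j => stepA acc (PySem.List.pyGetD word.toList j ' ')) []
      (PySem.List.pyRange 0 (PySem.List.len word.toList))).map (fun c => [c]))) = _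
  rw [PySem.List.foldl_pyRange_zero_pyGetD word.toList ' ' stepA []]

theorem stepA_eq_coreStep (acc : List Char) (c : Char)
    (ht : PySem.Chars.lowerChar c ≠ 't') (hi : PySem.Chars.lowerChar c ≠ 'i') :
    stepA acc c = coreStep acc (PySem.Chars.lowerChar c) := by
  simp only [stepA, coreStep, if_neg ht, if_neg hi]

theorem foldlA_eq_foldl_core (l : List Char) : ∀ acc : List Char,
    l.foldl stepA acc
      = ((PySem.Chars.lower l).filter (fun c => !(c == 't') && !(c == 'i'))).foldl coreStep acc := by
  induction l with
  | nil => intro acc; simp [PySem.Chars.lower]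
  | cons c t ih =>
      intro acc
      simp only [PySem.Chars.lower, List.map_cons, List.filter_cons, List.foldl_cons]
      by_cases ht : PySem.Chars.lowerChar c = 't'
      · have : stepA acc c = acc := by simp [stepA, ht]
        simp only [ht, this]
        simpa [PySem.Chars.lower] using ih acc
      · by_cases hi : PySem.Chars.lowerChar c = 'i'
        · have : stepA acc c = acc := by simp [stepA, hi]
          simp only [hi, this]
          simpa [PySem.Chars.lower] using ih acc
        · rw [stepA_eq_coreStep acc c ht hi]
          have hcond : (!(PySem.Chars.lowerChar c == 't') && !(PySem.Chars.lowerChar c == 'i')) = true := by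
            simp [ht, hi]
          simp only [hcond, if_pos, List.foldl_cons]
          simpa [PySem.Chars.lower] using ih (coreStep acc (PySem.Chars.lowerChar c))

theorem okR_of_ne (x c : Char) (hr : c ≠ 'r') (hg : c ≠ 'g') : okR x c := by
  unfold okR
  constructor <;> rintro ⟨-, h⟩ <;> [exact hr h; exact hg h]

theorem ok_push {l : List Char} {c : Char} (h : Ok l)
    (hl : ∀ x, l.getLast? = some x → okR x c) : Ok (l ++ [c]) := by
  rw [Ok, List.isChain_append]
  refine ⟨h, List.IsChain.singleton c, ?_⟩
  intro x hx y hy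
  simp at hy
  subst hy
  exact hl x (by simpa using hx)

theorem ok_coreStep {acc : List Char} (h : Ok acc) (c : Char) : Ok (coreStep acc c) := by
  rcases List.eq_nil_or_concat acc with rfl | ⟨a', x, rfl⟩
  · have hc : coreStep [] c = [c] := by simp [coreStep]
    rw [hc]
    exact List.IsChain.singleton c
  · simp only [List.concat_eq_append] at h ⊢
    have hOk' : Ok a' := by
      have := h.dropLast
      rwa [List.dropLast_concat] at this
  
    by_cases hr : c = 'r'
    · subst hr
      by_cases hx : x = 'e'
      · subst hx
        have hc : coreStep (a' ++ ['e']) 'r' = a' := by simp [coreStep]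
        rw [hc]
        exact hOk'
      · have hc : coreStep (a' ++ [x]) 'r' = a' ++ [x] ++ ['r'] := by simp [coreStep, hx]
        rw [hc]
        refine ok_push h ?_
        intro y hy
        simp at hy
        subst hy
        exact ⟨fun ⟨he, _⟩ => hx he, by rintro ⟨-, hh⟩; exact absurd hh (by decide)⟩
    · by_cases hg : c = 'g'
      · subst hg
        by_cases hx : x = 'g'
        · subst hx
          have hc : coreStep (a' ++ ['g']) 'g' = a' := by simp [coreStep]
          rw [hc]
          exact hOk'
        · have hc : coreStep (a' ++ [x]) 'g' = a' ++ [x] ++ ['g'] := by simp [coreStep, hx]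
          rw [hc]
          refine ok_push h ?_
          intro y hy
          simp at hy
          subst hy
          exact ⟨by rintro ⟨-, hh⟩; exact absurd hh (by decide), fun ⟨hgg, _⟩ => hx hgg⟩
      · have hc : coreStep (a' ++ [x]) c = a' ++ [x] ++ [c] := by simp [coreStep, hr, hg]
        rw [hc]
        exact ok_push h (fun y _ => okR_of_ne y c hr hg)

theorem foldl_core_er (v : List Char) (acc : List Char) :
    ('e' :: 'r' :: v).foldl coreStep acc = v.foldl coreStep acc := by
  simp only [List.foldl_cons]
  have h1 : coreStep acc 'e' = acc ++ ['e'] := by simp [coreStep]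
  have h2 : coreStep (acc ++ ['e']) 'r' = acc := by
    simp [coreStep]
  rw [h1, h2]

theorem foldl_core_gg (v : List Char) (acc : List Char) (h : Ok acc) :
    ('g' :: 'g' :: v).foldl coreStep acc = v.foldl coreStep acc := by
  simp only [List.foldl_cons]
  rcases List.eq_nil_or_concat acc with rfl | ⟨a', x, rfl⟩
  · have h1 : coreStep [] 'g' = ['g'] := by simp [coreStep]
    have h2 : coreStep ['g'] 'g' = [] := by simp [coreStep]
    rw [h1, h2]
  · simp only [List.concat_eq_append] at h ⊢
    by_cases hx : x = 'g'
    · subst hx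
      have hlast : ∀ y, a'.getLast? = some y → y ≠ 'g' := by
        intro y hy hcon
        rw [Ok, List.isChain_append] at h
        have := h.2.2 y (by simpa using hy) 'g' (by simp)
        exact this.2 ⟨hcon, rfl⟩
      have h1 : coreStep (a' ++ ['g']) 'g' = a' := by simp [coreStep]
      have h2 : coreStep a' 'g' = a' ++ ['g'] := by
        rcases List.eq_nil_or_concat a' with rfl | ⟨b', y, rfl⟩
        · simp [coreStep]
        · have hy : y ≠ 'g' := hlast y (by simp)
          simp [coreStep, hy]
      rw [h1, h2]
    · have h1 : coreStep (a' ++ [x]) 'g' = a' ++ [x] ++ ['g'] := by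
        simp [coreStep, hx]
      have h2 : coreStep (a' ++ [x] ++ ['g']) 'g' = a' ++ [x] := by
        simp [coreStep]
      rw [h1, h2]

theorem foldl_core_rem2_er (l : List Char) : ∀ acc : List Char, Ok acc →
    (rem2 'e' 'r' l).foldl coreStep acc = l.foldl coreStep acc := by
  fun_induction rem2 with
  | case1 => intro acc _; rfl
  | case2 => intro acc _; rfl
  | case3 c d t h ih =>
      intro acc hok
      obtain ⟨rfl, rfl⟩ := h
      rw [ih acc hok, foldl_core_er]
  | case4 c d t h ih =>
      intro acc hok
      simp only [List.foldl_cons]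
      exact ih (coreStep acc c) (ok_coreStep hok c)

theorem foldl_core_rem2_gg (l : List Char) : ∀ acc : List Char, Ok acc →
    (rem2 'g' 'g' l).foldl coreStep acc = l.foldl coreStep acc := by
  fun_induction rem2 with
  | case1 => intro acc _; rfl
  | case2 => intro acc _; rfl
  | case3 c d t h ih =>
      intro acc hok
      obtain ⟨rfl, rfl⟩ := h
      rw [ih acc hok, foldl_core_gg t acc hok]
  | case4 c d t h ih =>
      intro acc hok
      simp only [List.foldl_cons]
      exact ih (coreStep acc c) (ok_coreStep hok c)

theorem foldl_core_tigFix (s : List Char) (acc : List Char) (h : Ok acc) :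
    (tigFix s).foldl coreStep acc = s.foldl coreStep acc := by
  fun_induction tigFix s with
  | case1 s nxt heq => rfl
  | case2 s nxt heq ih =>
      rw [ih]
      show (PySem.Chars.replace (PySem.Chars.replace s ['e', 'r'] []) ['g', 'g'] []).foldl coreStep acc
        = s.foldl coreStep acc
      rw [replace_eq_rem2, replace_eq_rem2]
      rw [foldl_core_rem2_gg _ acc h, foldl_core_rem2_er _ acc h]

theorem tigFix_fixpoint (s : List Char) :
    rem2 'e' 'r' (tigFix s) = tigFix s ∧ rem2 'g' 'g' (tigFix s) = tigFix s := by
  fun_induction tigFix s with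
  | case1 s nxt heq =>
      have hrw : rem2 'g' 'g' (rem2 'e' 'r' s) = s := by
        rw [← replace_eq_rem2, ← replace_eq_rem2]
        exact heq
      have h1 : (rem2 'e' 'r' s).length ≤ s.length := rem2_length_le _ _ s
      have h2 : (rem2 'g' 'g' (rem2 'e' 'r' s)).length ≤ (rem2 'e' 'r' s).length :=
        rem2_length_le _ _ _
      have hlen : s.length = (rem2 'g' 'g' (rem2 'e' 'r' s)).length := by rw [hrw]
      have he : rem2 'e' 'r' s = s := rem2_eq_of_length_eq _ _ s (by omega)
      rw [he] at hrw
      exact ⟨he, hrw⟩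
  | case2 s nxt heq ih => exact ih

theorem chain_of_rem2_eq (a b : Char) :
    ∀ l : List Char, rem2 a b l = l → l.IsChain (fun x y => ¬(x = a ∧ y = b)) := by
  intro l
  fun_induction rem2 with
  | case1 => intro _; exact List.IsChain.nil
  | case2 c => intro _; exact List.IsChain.singleton c
  | case3 c d t h ih =>
      intro heq
      exfalso
      have hle := rem2_length_le a b t
      have : (rem2 a b t).length = (c :: d :: t).length := by rw [heq]
      simp at this
      omega
  | case4 c d t h ih =>
      intro heq
      rw [List.isChain_cons_cons]
      refine ⟨h, ih ?_⟩
      simpa using heq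

theorem isChain_and {P Q : Char → Char → Prop} :
    ∀ l : List Char, l.IsChain P → l.IsChain Q → l.IsChain (fun x y => P x y ∧ Q x y) := by
  intro l
  induction l with
  | nil => intro _ _; exact List.IsChain.nil
  | cons c t ih =>
      cases t with
      | nil => intro _ _; exact List.IsChain.singleton c
      | cons d t' =>
          intro hP hQ
          rw [List.isChain_cons_cons] at hP hQ ⊢
          exact ⟨⟨hP.1, hQ.1⟩, ih hP.2 hQ.2⟩

theorem ok_tigFix (s : List Char) : Ok (tigFix s) := by
  obtain ⟨he, hg⟩ := tigFix_fixpoint s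
  exact isChain_and _ (chain_of_rem2_eq _ _ _ he) (chain_of_rem2_eq _ _ _ hg)

theorem foldl_core_of_ok (l : List Char) : ∀ acc : List Char, Ok (acc ++ l) →
    l.foldl coreStep acc = acc ++ l := by
  induction l with
  | nil => intro acc _; simp
  | cons c t ih =>
      intro acc h
      have hlastpair : ∀ x, acc.getLast? = some x → okR x c := by
        intro x hx
        rw [Ok, List.isChain_append] at h
        exact h.2.2 x (by simpa using hx) c (by simp)
      have hpush : coreStep acc c = acc ++ [c] := by
        by_cases hr : c = 'r'
        · subst hr
          rcases List.eq_nil_or_concat acc with rfl | ⟨a', x, rfl⟩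
          · simp [coreStep]
          · simp only [List.concat_eq_append] at hlastpair ⊢
            have hx : x ≠ 'e' := fun hcon => (hlastpair x (by simp)).1 ⟨hcon, rfl⟩
            simp [coreStep, hx]
        · by_cases hg : c = 'g'
          · subst hg
            rcases List.eq_nil_or_concat acc with rfl | ⟨a', x, rfl⟩
            · simp [coreStep]
            · simp only [List.concat_eq_append] at hlastpair ⊢
              have hx : x ≠ 'g' := fun hcon => (hlastpair x (by simp)).2 ⟨hcon, rfl⟩
              simp [coreStep, hx]
          · simp [coreStep, hr, hg]
      rw [List.foldl_cons, hpush, ih (acc ++ [c]) (by simpa using h)]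
      simp

-- ===== VERDICT (by name: the statement is the Claim_ definition above) =====
theorem tiggerfy_spec : Claim_equal_tiggerfy := by
  intro word _
  show tiggerfy word = tiggerfy_alt word
  rw [tiggerfy_eq]
  unfold tiggerfy_alt
  rw [PySem.Chars.join_nil_singletons]
  congr 1
  rw [foldlA_eq_foldl_core]
  have hnil : Ok ([] : List Char) := List.IsChain.nil
  have h1 := foldl_core_tigFix
    ((PySem.Chars.lower word.toList).filter (fun c => !(c == 't') && !(c == 'i'))) [] hnil
  have h2 := foldl_core_of_ok
    (tigFix ((PySem.Chars.lower word.toList).filter (fun c => !(c == 't') && !(c == 'i')))) []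
    (by simpa using ok_tigFix _)
  rw [← h1, h2]
  simp
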